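-- pv_equiv track=rewrite | github.com/newrista/envault | envault/cascade.py | list_overrides
-- ===== SOURCE A (Python) =====
-- from typing import Dict, List, Optional, Tuple
--
-- INTERNAL_PREFIX = "__"
--
-- def _is_internal(key: str) -> bool:
--     return key.startswith(INTERNAL_PREFIX)
--
-- def list_overrides(
--     layers: List[Tuple[str, Dict[str, str]]],
-- ) -> Dict[str, List[Tuple[str, str]]]:
--     """Return every key that appears in more than one layer, with all its values.
--
--     Returns a dict mapping key -> [(vault_path, value), ...] ordered low-to-high.
--     Only keys with at least two occurrences are included.
--     """
--     occurrences: Dict[str, List[Tuple[str, str]]] = {}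
--     for vault_path, secrets in layers:
--         for key, value in secrets.items():
--             if _is_internal(key):
--                 continue
--             occurrences.setdefault(key, []).append((vault_path, value))
--     return {k: v for k, v in occurrences.items() if len(v) > 1}
-- ===== SOURCE B (Python) =====
-- from typing import Dict, List, Tuple
--
-- INTERNAL_PREFIX = "__"
--
--
-- def list_overrides(
--     layers: List[Tuple[str, Dict[str, str]]],
-- ) -> Dict[str, List[Tuple[str, str]]]:
--     # Pass 1: count occurrences of every non-internal key across all layers.
--     counts: Dict[str, int] = {}
--     for _vault_path, secrets in layers:
--         for key in secrets:
--             if key.startswith(INTERNAL_PREFIX):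
--                 continue
--             counts[key] = counts.get(key, 0) + 1
--     # Pass 2: collect (vault_path, value) pairs only for keys seen more than once.
--     result: Dict[str, List[Tuple[str, str]]] = {}
--     for vault_path, secrets in layers:
--         for key, value in secrets.items():
--             if key.startswith(INTERNAL_PREFIX) or counts[key] < 2:
--                 continue
--             result.setdefault(key, []).append((vault_path, value))
--     return result
-- ===== Notes on version B (the rewrite author's own statement) =====
-- stated objective: alternative
-- what changed: Replaces A's collect-all-then-filter (build full occurrence lists, then a dict comprehension keeping len>1) with a two-pass scheme: a first pass builds a key->count index, a second pass over the layers appends pairs only for keys whose count exceeds 1, so no discarded occurrence lists are ever built.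
import Mathlib
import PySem

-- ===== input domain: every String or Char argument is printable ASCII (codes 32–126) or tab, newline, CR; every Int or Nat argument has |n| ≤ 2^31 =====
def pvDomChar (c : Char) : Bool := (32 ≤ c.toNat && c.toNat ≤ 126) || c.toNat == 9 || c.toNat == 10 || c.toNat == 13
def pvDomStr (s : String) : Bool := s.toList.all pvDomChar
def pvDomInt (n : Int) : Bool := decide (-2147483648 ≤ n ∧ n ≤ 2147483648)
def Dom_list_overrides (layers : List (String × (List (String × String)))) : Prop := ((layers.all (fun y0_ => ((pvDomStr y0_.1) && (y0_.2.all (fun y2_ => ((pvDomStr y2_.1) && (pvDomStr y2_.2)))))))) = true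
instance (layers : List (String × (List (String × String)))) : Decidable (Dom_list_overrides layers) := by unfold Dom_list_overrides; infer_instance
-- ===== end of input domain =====

-- B replaces A's collect-everything-then-filter with a two-pass scheme (count index first,
-- then a guarded collection pass); same asymptotic cost, alternative decomposition.

-- ===== PORT A =====
-- _is_internal(key)
def pvIsInternal (key : String) : Bool := PySem.Str.startswith key "__"

def list_overrides (layers : List (String × (List (String × String)))) : List (String × List (String × String)) :=
  -- occurrences = {}; for vault_path, secrets in layers: for key, value in secrets.items(): ...
  let occurrences : PySem.Dict String (List (String × String)) :=
    layers.foldl (fun occ l =>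
      (PySem.Dict.ofList l.2).items.foldl (fun occ kv =>
        if pvIsInternal kv.1 then occ
        else occ.modify kv.1 [] (· ++ [(l.1, kv.2)])) occ)  -- setdefault(key, []).append(...)
      PySem.Dict.empty
  -- {k: v for k, v in occurrences.items() if len(v) > 1} (keys already distinct, in order)
  occurrences.items.filter (fun p => p.2.length > 1)

-- ===== PORT B =====
def list_overrides_alt (layers : List (String × (List (String × String)))) : List (String × List (String × String)) :=
  -- pass 1: counts[key] = counts.get(key, 0) + 1 over non-internal keys
  let counts : PySem.Dict String Int :=
    layers.foldl (fun c l =>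
      (PySem.Dict.ofList l.2).keys.foldl (fun c k =>
        if pvIsInternal k then c
        else c.modify k 0 (· + 1)) c)
      PySem.Dict.empty
  -- pass 2: result.setdefault(key, []).append((vault_path, value)) only when counts[key] >= 2
  let result : PySem.Dict String (List (String × String)) :=
    layers.foldl (fun r l =>
      (PySem.Dict.ofList l.2).items.foldl (fun r kv =>
        if pvIsInternal kv.1 || counts.getD kv.1 0 < 2 then r
        else r.modify kv.1 [] (· ++ [(l.1, kv.2)])) r)
      PySem.Dict.empty
  result.items

-- ===== PRECONDITION & SPEC =====
def Spec_list_overrides (layers : List (String × (List (String × String)))) (out : List (String × List (String × String))) : Prop := out = list_overrides_alt layers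
instance (layers : List (String × (List (String × String)))) (out : List (String × List (String × String))) : Decidable (Spec_list_overrides layers out) := by unfold Spec_list_overrides; infer_instance

-- ===== CLAIM (what is proved, stated in full; the proofs are below) =====
def Claim_equal_list_overrides : Prop := ∀ (layers : List (String × (List (String × String)))), Dom_list_overrides layers → Spec_list_overrides layers (list_overrides layers)

-- ===== LEMMAS AND PROOFS =====

-- the common stream of (key, (vault_path, value)) triples both programs traverse
def pvTriples (layers : List (String × (List (String × String)))) : List (String × (String × String)) :=
  layers.flatMap (fun l =>
    ((PySem.Dict.ofList l.2).items.filter (fun kv => !pvIsInternal kv.1)).map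
      (fun kv => (kv.1, (l.1, kv.2))))

-- "this key occurs at least twice among the firsts of ts"
def pvBig {kk : Type} [BEq kk] (ts : List (kk × (String × String))) (k : kk) : Bool :=
  decide (¬ ((ts.map (·.1)).count k < 2))

-- a skip-guarded foldl is a foldl over the filtered list
theorem pv_foldl_skip {a s : Type} (p : a → Bool) (f : s → a → s) :
    forall (l : List a) (st : s),
      l.foldl (fun st x => if p x then st else f st x) st = (l.filter (fun x => !p x)).foldl f st := by
  intro l
  induction l with
  | nil => intro st; rfl
  | cons x t ih =>
    intro st
    by_cases h : p x = true
    · rw [List.filter_cons_of_neg (by simpa using h)]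
      simp only [List.foldl_cons, h, if_true]
      exact ih st
    · rw [List.filter_cons_of_pos (by simpa using h)]
      simp only [List.foldl_cons, h]
      exact ih (f st x)

-- Set.ofList commutes with filter
theorem pv_ofList_filter {a : Type} [BEq a] [LawfulBEq a] (p : a → Bool) :
    forall (xs : List a), PySem.Set.ofList (xs.filter p) = (PySem.Set.ofList xs).filter p := by
  intro xs
  induction xs with
  | nil => rfl
  | cons x t ih =>
    by_cases h : p x = true
    · rw [List.filter_cons_of_pos h, PySem.Set.ofList_cons, ih, PySem.Set.ofList_cons,
        List.filter_cons_of_pos h]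
      unfold PySem.Set.discard
      rw [List.filter_comm]
    · rw [List.filter_cons_of_neg (by simpa using h), ih, PySem.Set.ofList_cons,
        List.filter_cons_of_neg (by simpa using h)]
      unfold PySem.Set.discard
      rw [List.filter_comm]
      refine (List.filter_eq_self.mpr ?_).symm
      intro y hy
      have hpy := List.of_mem_filter hy
      simp only [Bool.not_eq_true', beq_eq_false_iff_ne, ne_eq]
      rintro rfl
      exact h hpy

-- the grouped dict built by modify-append, characterised
theorem pv_occ_getD {kk : Type} [BEq kk] [LawfulBEq kk] (ts : List (kk × (String × String))) (k : kk) :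
    (ts.foldl (fun d t => d.modify t.1 [] (· ++ [t.2])) PySem.Dict.empty).getD k []
      = (ts.filter (fun t => t.1 == k)).map (·.2) := by
  have := PySem.Dict.getD_foldl_modify_append (l := ts) (d := PySem.Dict.empty) (c := k)
  simpa using this

theorem pv_occ_keys {kk : Type} [BEq kk] [LawfulBEq kk] (ts : List (kk × (String × String))) :
    (ts.foldl (fun d t => d.modify t.1 [] (· ++ [t.2])) PySem.Dict.empty).keys
      = PySem.Set.ofList (ts.map (·.1)) := by
  have := PySem.Dict.keys_foldl_modify_key (l := ts) (key := (·.1))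
    (d0 := ([] : List (String × String)))
    (f := fun (_ : PySem.Dict kk (List (String × String))) t =>
      ((· ++ [t.2]) : List (String × String) → List (String × String)))
    (d := PySem.Dict.empty)
  simpa [PySem.Set.update_empty] using this

-- items of the grouped dict, as a map over the deduplicated key list
theorem pv_occ_items {kk : Type} [BEq kk] [LawfulBEq kk] (ts : List (kk × (String × String))) :
    (ts.foldl (fun d t => d.modify t.1 [] (· ++ [t.2])) PySem.Dict.empty).items
      = (PySem.Set.ofList (ts.map (·.1))).map
          (fun k => (k, (ts.filter (fun t => t.1 == k)).map (·.2))) := by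
  set d := ts.foldl (fun d t => d.modify t.1 [] (· ++ [t.2])) PySem.Dict.empty with hd
  have hnd : d.keys.Nodup := by
    rw [hd, pv_occ_keys]; exact PySem.Set.nodup_ofList _
  rw [PySem.Dict.items_eq_map_keys d hnd ([] : List (String × String)), hd, pv_occ_keys]
  exact List.map_congr_left (fun k _ => by rw [← hd, pv_occ_getD])

-- counting: filtered length equals count of the key among the firsts
theorem pv_len_filter_eq_count {kk : Type} [BEq kk] [LawfulBEq kk]
    (ts : List (kk × (String × String))) (k : kk) :
    (ts.filter (fun t => t.1 == k)).length = (ts.map (·.1)).count k := by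
  rw [List.count_eq_countP, List.countP_map, List.countP_eq_length_filter]
  rfl

-- the main abstract lemma: filter-after-group equals group-of-filtered
theorem pv_core {kk : Type} [BEq kk] [LawfulBEq kk]
    (ts : List (kk × (String × String))) :
    (ts.foldl (fun d t => d.modify t.1 [] (· ++ [t.2])) PySem.Dict.empty).items.filter
        (fun p => p.2.length > 1)
      = ((ts.filter (fun t => pvBig ts t.1)).foldl
          (fun d t => d.modify t.1 [] (· ++ [t.2])) PySem.Dict.empty).items := by
  rw [pv_occ_items, pv_occ_items, List.filter_map]
  have hfm : (ts.filter (fun t => pvBig ts t.1)).map (·.1) = (ts.map (·.1)).filter (pvBig ts) :=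
    (List.filter_map (p := pvBig ts) (f := fun t : kk × String × String => t.1) (l := ts)).symm
  rw [hfm, pv_ofList_filter]
  have hset : (PySem.Set.ofList (ts.map (·.1))).filter
        ((fun p => p.2.length > 1) ∘ fun k => (k, (ts.filter (fun t => t.1 == k)).map (·.2)))
      = (PySem.Set.ofList (ts.map (·.1))).filter (pvBig ts) := by
    apply List.filter_congr
    intro k _
    simp only [Function.comp, List.length_map, pvBig]
    rw [pv_len_filter_eq_count]
    by_cases h : (ts.map (·.1)).count k < 2 <;> simp [h] <;> omega
  rw [hset]
  apply List.map_congr_left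
  intro k hk
  have hkp : pvBig ts k = true := List.of_mem_filter hk
  congr 1
  rw [List.filter_filter]
  refine congrArg (List.map _) (List.filter_congr ?_)
  intro t _
  by_cases h : (t.1 == k) = true
  · have : t.1 = k := eq_of_beq h
    simp [this, hkp]
  · simp [h]

-- A collapses to the grouped-then-filtered form over the triple stream
theorem pv_A_eq (layers : List (String × (List (String × String)))) :
    list_overrides layers
      = ((pvTriples layers).foldl (fun d t => d.modify t.1 [] (· ++ [t.2]))
          PySem.Dict.empty).items.filter (fun p => p.2.length > 1) := by
  simp only [list_overrides, pvTriples]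
  rw [List.foldl_flatMap]
  congr 2
  apply PySem.List.foldl_congr_mem
  intro acc l _
  rw [List.foldl_map, pv_foldl_skip]

-- B's counts dict counts the firsts of the triple stream
theorem pv_counts_eq (layers : List (String × (List (String × String)))) :
    (layers.foldl (fun c l =>
        (PySem.Dict.ofList l.2).keys.foldl (fun c k =>
          if pvIsInternal k then c else c.modify k 0 (· + 1)) c)
        (PySem.Dict.empty : PySem.Dict String Int))
      = ((pvTriples layers).map (·.1)).foldl (fun c k => c.modify k 0 (· + 1)) PySem.Dict.empty := by
  simp only [pvTriples]
  rw [List.map_flatMap, List.foldl_flatMap]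
  apply PySem.List.foldl_congr_mem
  intro acc l _
  simp only [PySem.Dict.keys]
  rw [List.foldl_map, pv_foldl_skip, List.map_map, List.foldl_map]
  rfl

-- B collapses to the guarded grouped form over the triple stream
theorem pv_B_eq (layers : List (String × (List (String × String)))) :
    list_overrides_alt layers
      = (((pvTriples layers).filter (fun t => pvBig (pvTriples layers) t.1)).foldl
          (fun d t => d.modify t.1 [] (· ++ [t.2])) PySem.Dict.empty).items := by
  simp only [list_overrides_alt]
  rw [pv_counts_eq]
  congr 1
  generalize hP : pvBig (pvTriples layers) = P
  conv_rhs => rw [pvTriples]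
  rw [List.filter_flatMap, List.foldl_flatMap]
  apply PySem.List.foldl_congr_mem
  intro acc l _
  conv_rhs => rw [List.filter_map, List.foldl_map]
  rw [pv_foldl_skip, List.filter_filter]
  congr 1
  apply List.filter_congr
  intro kv _
  have hc : ((((pvTriples layers).map (·.1)).foldl (fun c k => c.modify k 0 (· + 1))
        (PySem.Dict.empty : PySem.Dict String Int)).getD kv.1 0)
      = ((((pvTriples layers).map (·.1)).count kv.1 : Int)) := by
    rw [PySem.Dict.getD_foldl_modify_add_one]
    simp
  rw [hc, ← hP]
  simp only [Function.comp, pvBig]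
  by_cases h1 : pvIsInternal kv.1 = true
  · simp [h1]
  · by_cases h2 : (((pvTriples layers).map (·.1)).count kv.1) < 2
    · have h2' : ((((pvTriples layers).map (·.1)).count kv.1 : Int)) < 2 := by exact_mod_cast h2
      simp [h1, h2, h2']
    · have h2' : ¬ ((((pvTriples layers).map (·.1)).count kv.1 : Int)) < 2 := by exact_mod_cast h2
      simp [h1, h2, h2']

-- ===== VERDICT (by name: the statement is the Claim_ definition above) =====
theorem list_overrides_spec : Claim_equal_list_overrides := by
  intro layers _
  unfold Spec_list_overrides
  rw [pv_A_eq, pv_B_eq, pv_core]
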